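-- pv_equiv track=rewrite | github.com/junstar96/git_codetest | cord_test/dynamic/square_fill.py | count_way
-- ===== SOURCE A (Python) =====
-- def count_way(value):
--     if value == 0:
--         return 0
--     if value == 1:
--         return 1
--     if value == 2:
--         return 2
--
--     dp = [0] * (value + 1)
--
--     dp[0] = 1
--     dp[1] = 1
--     dp[2] = 2
--
--     for i in range(3, value+1):
--         dp[i] = dp[i-1] + dp[i-2]
--
--     return dp[value]
-- ===== SOURCE B (Python) =====
-- def count_way(value):
--     if value == 0:
--         return 0
--
--     def fib_pair(n):
--         # returns (F(n), F(n+1)) with F(0)=0, F(1)=1, by fast doubling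
--         if n == 0:
--             return (0, 1)
--         a, b = fib_pair(n // 2)
--         c = a * (2 * b - a)
--         d = a * a + b * b
--         if n % 2 == 0:
--             return (c, d)
--         return (d, c + d)
--
--     return fib_pair(value + 1)[0]
-- ===== Notes on version B (the rewrite author's own statement) =====
-- stated objective: faster
-- what changed: Replaces the O(n) DP array of the Fibonacci recurrence with fast-doubling Fibonacci, computing count_way(n)=F(n+1) in O(log n) arithmetic operations and O(1) extra space.
import Mathlib
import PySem

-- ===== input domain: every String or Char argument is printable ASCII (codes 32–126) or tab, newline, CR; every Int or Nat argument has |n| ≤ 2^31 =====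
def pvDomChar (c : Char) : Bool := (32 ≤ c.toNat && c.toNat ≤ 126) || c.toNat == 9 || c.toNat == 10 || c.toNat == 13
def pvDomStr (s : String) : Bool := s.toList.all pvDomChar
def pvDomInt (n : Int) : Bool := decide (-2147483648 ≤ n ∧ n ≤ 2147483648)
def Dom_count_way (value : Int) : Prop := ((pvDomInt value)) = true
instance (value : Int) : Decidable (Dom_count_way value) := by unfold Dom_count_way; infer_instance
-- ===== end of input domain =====

-- B replaces A's O(n) DP array with fast-doubling Fibonacci (O(log n) arithmetic ops).

-- ===== PORT A =====
-- literal port: dp = [0]*(value+1); dp[0..2] initialised; loop i in range(3, value+1)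
def count_way (value : Int) : Int :=
  if value == 0 then 0
  else if value == 1 then 1
  else if value == 2 then 2
  else
    let dp := List.replicate (value + 1).toNat (0 : Int)
    let dp := PySem.List.pySetD dp 0 1
    let dp := PySem.List.pySetD dp 1 1
    let dp := PySem.List.pySetD dp 2 2
    let dp := (PySem.List.pyRange 3 (value + 1) 1).foldl
      (fun dp i =>
        PySem.List.pySetD dp i (PySem.List.pyGetD dp (i - 1) 0 + PySem.List.pyGetD dp (i - 2) 0)) dp
    PySem.List.pyGetD dp value 0

-- ===== PORT B =====
-- fast-doubling helper: fib_pair n = (F n, F (n+1)); recursion on n // 2 as in Source B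
-- (the Python helper's argument is nonnegative under Pre_, so Nat recursion is exact)
def fibPair (n : Nat) : Int × Int :=
  if h : n = 0 then (0, 1)
  else
    let p := fibPair (n / 2)
    let a := p.1
    let b := p.2
    let c := a * (2 * b - a)
    let d := a * a + b * b
    if n % 2 = 0 then (c, d) else (d, c + d)
termination_by n
decreasing_by exact Nat.div_lt_self (Nat.pos_of_ne_zero h) (by norm_num)

def count_way_alt (value : Int) : Int :=
  if value == 0 then 0
  else (fibPair (value + 1).toNat).1

-- ===== PRECONDITION & SPEC =====
-- Pre_ excludes value < 0, where A raises (IndexError on dp[0] = 1 of an empty list).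
def Pre_count_way (value : Int) : Prop := 0 ≤ value
instance (value : Int) : Decidable (Pre_count_way value) := by unfold Pre_count_way; infer_instance
def pvWitness_count_way : Int := 5

def Spec_count_way (value : Int) (out : Int) : Prop := out = count_way_alt value
instance (value : Int) (out : Int) : Decidable (Spec_count_way value out) := by unfold Spec_count_way; infer_instance

-- ===== CLAIM (what is proved, stated in full; the proofs are below) =====
def Claim_equal_count_way : Prop := ∀ (value : Int), Dom_count_way value → Pre_count_way value → Spec_count_way value (count_way value)

-- ===== LEMMAS AND PROOFS =====

-- B side: fibPair n = (F n, F (n+1))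
theorem fibPair_eq (n : Nat) : fibPair n = ((Nat.fib n : Int), (Nat.fib (n + 1) : Int)) := by
  induction n using Nat.strong_induction_on with
  | _ n ih =>
    rw [fibPair]
    by_cases h : n = 0
    · simp [h]
    · simp only [h, dite_false]
      rw [ih (n / 2) (Nat.div_lt_self (Nat.pos_of_ne_zero h) (by norm_num))]
      have hk : Nat.fib (n / 2) ≤ 2 * Nat.fib (n / 2 + 1) :=
        le_trans (Nat.fib_le_fib_succ) (by omega)
      rcases Nat.even_or_odd n with he | ho
      · obtain ⟨k, hk2⟩ := he
        have hdiv : n / 2 = k := by omega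
        have hmod : n % 2 = 0 := by omega
        simp only [hdiv, hmod, if_true, Prod.mk.injEq]
        have h2 : Nat.fib (2 * k) = Nat.fib k * (2 * Nat.fib (k + 1) - Nat.fib k) :=
          Nat.fib_two_mul k
        have h3 : Nat.fib (2 * k + 1) = Nat.fib (k + 1) ^ 2 + Nat.fib k ^ 2 :=
          Nat.fib_two_mul_add_one k
        constructor
        · have : (Nat.fib (2 * k) : Int) = (Nat.fib k : Int) * (2 * (Nat.fib (k + 1) : Int) - (Nat.fib k : Int)) := by
            rw [h2]
            push_cast [Nat.cast_sub (by simpa [hdiv] using hk)]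
            ring
          rw [show n = 2 * k by omega, this]
        · have : (Nat.fib (2 * k + 1) : Int) = (Nat.fib k : Int) * (Nat.fib k : Int) + (Nat.fib (k + 1) : Int) * (Nat.fib (k + 1) : Int) := by
            rw [h3]; push_cast; ring
          rw [show n + 1 = 2 * k + 1 by omega, this]
      · obtain ⟨k, hk2⟩ := ho
        have hdiv : n / 2 = k := by omega
        have hmod : ¬ (n % 2 = 0) := by omega
        simp only [hdiv, hmod, if_false, Prod.mk.injEq]
        have h2 : Nat.fib (2 * k) = Nat.fib k * (2 * Nat.fib (k + 1) - Nat.fib k) :=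
          Nat.fib_two_mul k
        have h3 : Nat.fib (2 * k + 1) = Nat.fib (k + 1) ^ 2 + Nat.fib k ^ 2 :=
          Nat.fib_two_mul_add_one k
        have hc : (Nat.fib (2 * k) : Int) = (Nat.fib k : Int) * (2 * (Nat.fib (k + 1) : Int) - (Nat.fib k : Int)) := by
          rw [h2]
          push_cast [Nat.cast_sub (by simpa [hdiv] using hk)]
          ring
        have hd : (Nat.fib (2 * k + 1) : Int) = (Nat.fib k : Int) * (Nat.fib k : Int) + (Nat.fib (k + 1) : Int) * (Nat.fib (k + 1) : Int) := by
          rw [h3]; push_cast; ring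
        constructor
        · rw [show n = 2 * k + 1 by omega, hd]
        · have hfib : Nat.fib (2 * k + 2) = Nat.fib (2 * k) + Nat.fib (2 * k + 1) := by
            rw [Nat.fib_add_two]
          have : (Nat.fib (2 * k + 2) : Int) = (Nat.fib (2 * k) : Int) + (Nat.fib (2 * k + 1) : Int) := by
            exact_mod_cast congrArg (Nat.cast : Nat → Int) hfib
          rw [show n + 1 = 2 * k + 2 by omega, this, hc, hd]

-- A side: invariant of the DP loop.
-- dpInit N is dp after the three initial assignments for value = N; loopA runs range(3, m).
def dpInit (N : Nat) : List Int :=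
  ((List.replicate (N + 1) (0 : Int)).set 0 1).set 1 1 |>.set 2 2

def stepA (dp : List Int) (i : Int) : List Int :=
  PySem.List.pySetD dp i (PySem.List.pyGetD dp (i - 1) 0 + PySem.List.pyGetD dp (i - 2) 0)

theorem getD_set_ne (l : List Int) (i j : Nat) (a d : Int) (h : i ≠ j) :
    (l.set i a).getD j d = l.getD j d := by
  simp [List.getD, List.getElem?_set_ne h]

theorem getD_set_self (l : List Int) (i : Nat) (a d : Int) (h : i < l.length) :
    (l.set i a).getD i d = a := by
  simp [List.getD, h]

theorem dpInit_length (N : Nat) : (dpInit N).length = N + 1 := by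
  simp [dpInit]

theorem dpInit_getD (N : Nat) (hN : 3 ≤ N) (j : Nat) (hj : j < 3) :
    (dpInit N).getD j 0 = (Nat.fib (j + 1) : Int) := by
  simp only [dpInit]
  interval_cases j
  · rw [getD_set_ne _ _ _ _ _ (by omega), getD_set_ne _ _ _ _ _ (by omega),
      getD_set_self _ _ _ _ (by simp)]
    norm_num
  · rw [getD_set_ne _ _ _ _ _ (by omega),
      getD_set_self _ _ _ _ (by simp; omega)]
    norm_num
  · rw [getD_set_self _ _ _ _ (by simp; omega)]
    norm_num [Nat.fib_add_two]

-- main invariant: after running the loop up to m (3 ≤ m ≤ N+1),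
-- the list has length N+1 and entry j < m holds fib (j+1)
theorem loop_inv (N : Nat) (hN : 3 ≤ N) :
    ∀ m : Nat, 3 ≤ m → m ≤ N + 1 →
      ((PySem.List.pyRange 3 (m : Int) 1).foldl stepA (dpInit N)).length = N + 1 ∧
      ∀ j : Nat, j < m →
        ((PySem.List.pyRange 3 (m : Int) 1).foldl stepA (dpInit N)).getD j 0 = (Nat.fib (j + 1) : Int) := by
  intro m
  induction m with
  | zero => omega
  | succ m ih =>
    intro h3 hle
    by_cases hm : m = 2
    · subst hm
      rw [show ((2 + 1 : Nat) : Int) = 3 by norm_num, PySem.List.pyRange_one_eq_nil (by omega)]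
      simp only [List.foldl_nil]
      exact ⟨dpInit_length N, fun j hj => dpInit_getD N hN j hj⟩
    · have h3m : 3 ≤ m := by omega
      obtain ⟨hlen, hval⟩ := ih h3m (by omega)
      have hsplit : PySem.List.pyRange 3 ((m : Int) + 1) 1 =
          PySem.List.pyRange 3 (m : Int) 1 ++ [(m : Int)] :=
        PySem.List.pyRange_one_succ_right (by exact_mod_cast by omega)
      rw [show (((m + 1 : Nat)) : Int) = (m : Int) + 1 by push_cast; ring, hsplit,
        List.foldl_append]
      set dp := (PySem.List.pyRange 3 (m : Int) 1).foldl stepA (dpInit N) with hdp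
      simp only [List.foldl_cons, List.foldl_nil]
      have hmlt : m < dp.length := by omega
      have hstep : stepA dp (m : Int) =
          dp.set m (dp.getD (m - 1) 0 + dp.getD (m - 2) 0) := by
        simp only [stepA]
        rw [show ((m : Int) - 1) = ((m - 1 : Nat) : Int) by push_cast [Nat.cast_sub (by omega : 1 ≤ m)]; ring,
            show ((m : Int) - 2) = ((m - 2 : Nat) : Int) by push_cast [Nat.cast_sub (by omega : 2 ≤ m)]; ring]
        simp [PySem.List.pySetD_natCast, PySem.List.pyGetD_natCast]
      rw [hstep]
      constructor
      · simp [List.length_set, hlen]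
      · intro j hj
        by_cases hjm : j = m
        · subst hjm
          rw [getD_set_self _ _ _ _ hmlt, hval (j - 1) (by omega), hval (j - 2) (by omega)]
          have : Nat.fib (j + 1) = Nat.fib (j - 1) + Nat.fib (j - 1 + 1) := by
            have := Nat.fib_add_two (n := j - 1)
            rw [show j - 1 + 2 = j + 1 by omega] at this
            omega
          rw [show j - 2 + 1 = j - 1 by omega, this]
          push_cast; ring
        · rw [getD_set_ne _ _ _ _ _ (fun h => hjm h.symm)]
          exact hval j (by omega)

-- ===== VERDICT (by name: the statement is the Claim_ definition above) =====
theorem count_way_spec : Claim_equal_count_way := by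
  intro value _ hpre
  unfold Spec_count_way count_way count_way_alt
  rcases eq_or_lt_of_le hpre with h0 | hpos
  · simp [← h0]
  · by_cases h1 : value = 1
    · subst h1; simp only [fibPair_eq]; decide
    · by_cases h2 : value = 2
      · subst h2; simp only [fibPair_eq]; decide
      · have h3 : 3 ≤ value := by omega
        obtain ⟨N, hN⟩ : ∃ N : Nat, value = (N : Int) := ⟨value.toNat, by omega⟩
        subst hN
        have hN3 : 3 ≤ N := by exact_mod_cast h3
        have hne0 : ¬ ((N : Int) == 0) = true := by simp; omega
        have hne1 : ¬ ((N : Int) == 1) = true := by simp; omega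
        have hne2 : ¬ ((N : Int) == 2) = true := by simp; omega
        simp only [hne0, hne1, hne2]
        -- identify the initial list with dpInit N
        have hinit : PySem.List.pySetD (PySem.List.pySetD (PySem.List.pySetD
            (List.replicate ((N : Int) + 1).toNat (0 : Int)) 0 1) 1 1) 2 2 = dpInit N := by
          simp [dpInit, PySem.List.pySetD_of_nonneg, show ((N : Int) + 1).toNat = N + 1 by omega]
        rw [hinit]
        obtain ⟨hlen, hval⟩ := loop_inv N hN3 (N + 1) (by omega) (by omega)
        rw [show ((N : Int) + 1) = ((N + 1 : Nat) : Int) by push_cast; ring]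
        have hstep : (fun dp i => PySem.List.pySetD dp i
            (PySem.List.pyGetD dp (i - 1) 0 + PySem.List.pyGetD dp (i - 2) 0)) = stepA := by
          funext dp i; simp [stepA]
        rw [hstep]
        rw [show PySem.List.pyGetD ((PySem.List.pyRange 3 ((N + 1 : Nat) : Int) 1).foldl stepA (dpInit N)) (N : Int) 0
              = ((PySem.List.pyRange 3 ((N + 1 : Nat) : Int) 1).foldl stepA (dpInit N)).getD N 0 from
            PySem.List.pyGetD_natCast ..]
        rw [hval N (by omega), fibPair_eq]
        simp
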